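-- pv_equiv track=rewrite | github.com/beinganuvesh/Cheatsheet-DS-ALGO | CheatSheet-1.py | spaceString
-- ===== SOURCE A (Python) =====
-- def spaceString(s):
--     #Base Case
--     if len(s)==0:
--         l=[]
--         l.append('')
--         return l
--     ans=[]
--     smallerOutput=spaceString(s[1:])
--
--     for i in smallerOutput:
--         ans.append(s[0]+i)
--     for i in smallerOutput:
--         ans.append(s[0]+" "+i)
--
--     return ans
-- ===== SOURCE B (Python) =====
-- def spaceString(s):
--     n = len(s)
--     res = []
--     for mask in range(2 ** n):
--         chars = []
--         for i in range(n):
--             chars.append(s[i])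
--             if (mask >> (n - 1 - i)) & 1:
--                 chars.append(' ')
--         res.append(''.join(chars))
--     return res
-- ===== Notes on version B (the rewrite author's own statement) =====
-- stated objective: simpler
-- what changed: Replaced A's recursion (which builds 2^n results by prefixing s[0] and s[0]+' ' onto the recursive output for s[1:]) with a single iterative pass over bitmasks 0..2^n-1, constructing each output string directly from the mask's bits.
import Mathlib
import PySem

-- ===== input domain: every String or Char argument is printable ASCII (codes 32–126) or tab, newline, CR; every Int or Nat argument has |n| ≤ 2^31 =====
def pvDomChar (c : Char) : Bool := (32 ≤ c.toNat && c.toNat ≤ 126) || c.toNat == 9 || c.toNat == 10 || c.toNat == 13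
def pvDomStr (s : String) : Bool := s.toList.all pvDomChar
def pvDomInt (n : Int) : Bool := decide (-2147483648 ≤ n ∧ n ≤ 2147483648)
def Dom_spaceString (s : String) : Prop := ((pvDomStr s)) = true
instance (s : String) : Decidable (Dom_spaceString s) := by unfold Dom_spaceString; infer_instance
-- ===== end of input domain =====

-- B replaces A's recursion (prefix char distributed over the recursive result, twice) by a
-- single pass over bitmasks 0..2^n-1, building each string directly; objective: simpler/iterative.

-- ===== PORT A =====
-- A's recursion, over the character list of s; each result string kept as a List Char.
def spaceStringAux : List Char → List (List Char)
  | [] => [[]]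
  | c :: rest =>
    let smallerOutput := spaceStringAux rest
    smallerOutput.map (fun i => c :: i) ++ smallerOutput.map (fun i => c :: ' ' :: i)

def spaceString (s : String) : List String :=
  (spaceStringAux s.toList).map String.ofList

-- ===== PORT B =====
-- B's inner loop: walk the characters with index i, appending s[i] and a space iff
-- bit (n-1-i) of mask is set.
def spaceStringBuild (n : Nat) (mask : Nat) : Nat → List Char → List Char
  | _, [] => []
  | i, c :: rest =>
    if (mask >>> (n - 1 - i)) &&& 1 == 1
    then c :: ' ' :: spaceStringBuild n mask (i + 1) rest
    else c :: spaceStringBuild n mask (i + 1) rest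

def spaceString_alt (s : String) : List String :=
  let cs := s.toList
  let n := cs.length
  (List.range (2 ^ n)).map (fun mask => String.ofList (spaceStringBuild n mask 0 cs))

-- ===== PRECONDITION & SPEC =====
def Spec_spaceString (s : String) (out : List String) : Prop := out = spaceString_alt s
instance (s : String) (out : List String) : Decidable (Spec_spaceString s out) := by unfold Spec_spaceString; infer_instance

-- ===== CLAIM (what is proved, stated in full; the proofs are below) =====
def Claim_equal_spaceString : Prop := ∀ (s : String), Dom_spaceString s → Spec_spaceString s (spaceString s)

-- ===== LEMMAS AND PROOFS =====

-- shifting the position index by one matches lowering the bit-width parameter by one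
theorem spaceStringBuild_succ (m mask : Nat) :
    ∀ (xs : List Char) (i : Nat),
      spaceStringBuild (m + 1) mask (i + 1) xs = spaceStringBuild m mask i xs := by
  intro xs
  induction xs with
  | nil => intro i; simp [spaceStringBuild]
  | cons c rest ih =>
    intro i
    have h : m - (i + 1) = m - 1 - i := by omega
    simp [spaceStringBuild, h, ih]

-- a bit strictly below position m is unchanged by adding 2^m
theorem bit_low (m k j : Nat) (hk : k < m) :
    ((2 ^ m + j) >>> k) &&& 1 = (j >>> k) &&& 1 := by
  simp only [Nat.shiftRight_eq_div_pow, Nat.and_one_is_mod]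
  have hpow : 2 ^ m = 2 ^ k * 2 ^ (m - k) := by
    rw [← pow_add]; congr 1; omega
  rw [hpow, Nat.mul_add_div (by positivity)]
  have : 2 ^ (m - k) = 2 * 2 ^ (m - k - 1) := by
    rw [← pow_succ']; congr 1; omega
  omega

-- bits below m don't see the added 2^m
theorem spaceStringBuild_add_pow (m j : Nat) :
    ∀ (xs : List Char) (i : Nat), i + xs.length ≤ m →
      spaceStringBuild m (2 ^ m + j) i xs = spaceStringBuild m j i xs := by
  intro xs
  induction xs with
  | nil => intro i _; simp [spaceStringBuild]
  | cons c rest ih =>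
    intro i hle
    have hk : m - 1 - i < m := by simp at hle; omega
    have hb := bit_low m (m - 1 - i) j hk
    have hr := ih (i + 1) (by simp at hle ⊢; omega)
    simp [spaceStringBuild, hb, hr]

-- the top bit of mask < 2^m is clear
theorem top_bit_zero (m mask : Nat) (h : mask < 2 ^ m) :
    (mask >>> m) &&& 1 = 0 := by
  simp [Nat.shiftRight_eq_div_pow, Nat.and_one_is_mod, Nat.div_eq_of_lt h]

-- the top bit of 2^m + j is set (j < 2^m)
theorem top_bit_one (m j : Nat) (h : j < 2 ^ m) :
    ((2 ^ m + j) >>> m) &&& 1 = 1 := by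
  simp only [Nat.shiftRight_eq_div_pow, Nat.and_one_is_mod]
  rw [Nat.add_div_left _ (by positivity), Nat.div_eq_of_lt h]

theorem spaceString_main :
    ∀ (cs : List Char),
      spaceStringAux cs
        = (List.range (2 ^ cs.length)).map (fun mask => spaceStringBuild cs.length mask 0 cs) := by
  intro cs
  induction cs with
  | nil => simp [spaceStringAux, spaceStringBuild]
  | cons c rest ih =>
    have hsplit : (2 : Nat) ^ (c :: rest).length = 2 ^ rest.length + 2 ^ rest.length := by
      simp [List.length_cons, pow_succ]; ring
    rw [hsplit, List.range_add, List.map_append, List.map_map]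
    simp only [Function.comp_def]
    have h1 : ∀ mask ∈ List.range (2 ^ rest.length),
        spaceStringBuild (c :: rest).length mask 0 (c :: rest)
          = c :: spaceStringBuild rest.length mask 0 rest := by
      intro mask hm
      rw [List.mem_range] at hm
      have hz := top_bit_zero rest.length mask hm
      have hidx : (c :: rest).length - 1 - 0 = rest.length := by simp
      simp only [spaceStringBuild, hidx, hz]
      simp [List.length_cons, spaceStringBuild_succ]
    have h2 : ∀ mask ∈ List.range (2 ^ rest.length),
        spaceStringBuild (c :: rest).length (2 ^ rest.length + mask) 0 (c :: rest)
          = c :: ' ' :: spaceStringBuild rest.length mask 0 rest := by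
      intro mask hm
      rw [List.mem_range] at hm
      have ho := top_bit_one rest.length mask hm
      have hidx : (c :: rest).length - 1 - 0 = rest.length := by simp
      simp only [spaceStringBuild, hidx, ho]
      simp only [List.length_cons, spaceStringBuild_succ]
      rw [spaceStringBuild_add_pow rest.length mask rest 0 (by simp)]
      simp
    rw [List.map_congr_left h1, List.map_congr_left (fun mask hm => h2 mask hm)]
    simp only [spaceStringAux, ih, List.map_map]
    rfl

-- ===== VERDICT (by name: the statement is the Claim_ definition above) =====
theorem spaceString_spec : Claim_equal_spaceString := by
  intro s _
  unfold Spec_spaceString spaceString spaceString_alt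
  rw [spaceString_main s.toList, List.map_map]
  rfl
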